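-- pv_equiv track=rewrite | github.com/kwonjeomsim/nlp_hw1 | 202017944_hw1.py | slash_word_to_token
-- ===== SOURCE A (Python) =====
-- vocabulary = []
--
-- def slash_word_to_token(word):
--     token_bench = []
--     result_bench = []
--
--     for token in vocabulary:
--         if token in word:
--             token_bench.append(token)
--
--     for i in range(0, len(word) - 1):
--         for j in range(i + 1, len(word)):
--             if word[i:j] in token_bench:
--                 result_bench.append(word[i:j])
--
--         result_bench.append('<unk>')
--
--     return result_bench
-- ===== SOURCE B (Python) =====
-- vocabulary = []
--
-- def slash_word_to_token(word):
--     # `vocabulary` is the empty module constant, so no slice of `word` can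
--     # ever match; each outer iteration contributes exactly one '<unk>'.
--     return ['<unk>'] * (len(word) - 1)
-- ===== Notes on version B (the rewrite author's own statement) =====
-- stated objective: faster
-- what changed: Since the module-level `vocabulary` is the empty list, the prefilter pass and the nested substring-slicing loops can never append a match, so B replaces them with the closed form ['<unk>'] * (len(word) - 1).
import Mathlib
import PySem

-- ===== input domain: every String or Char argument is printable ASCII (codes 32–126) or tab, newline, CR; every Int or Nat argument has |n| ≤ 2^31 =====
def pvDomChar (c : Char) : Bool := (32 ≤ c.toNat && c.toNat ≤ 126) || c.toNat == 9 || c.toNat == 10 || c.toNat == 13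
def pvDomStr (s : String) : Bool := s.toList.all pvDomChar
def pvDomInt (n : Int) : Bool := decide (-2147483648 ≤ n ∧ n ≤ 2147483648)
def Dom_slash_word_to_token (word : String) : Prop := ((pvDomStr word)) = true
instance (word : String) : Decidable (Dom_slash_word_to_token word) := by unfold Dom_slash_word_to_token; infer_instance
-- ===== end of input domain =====

-- ===== PORT A =====
-- same-module constant used by A
def pvVocabulary : List String := []

-- literal port of A: build token_bench from `vocabulary`, then the nested
-- index loops appending matching slices and one '<unk>' per outer step
def slash_word_to_token (word : String) : List String :=
  let token_bench : List String :=
    pvVocabulary.foldl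
      (fun acc token => if PySem.Str.isIn token word then acc ++ [token] else acc) []
  (PySem.List.pyRange 0 ((PySem.Str.len word : Int) - 1) 1).foldl
    (fun rb i =>
      ((PySem.List.pyRange (i + 1) (PySem.Str.len word : Int) 1).foldl
        (fun rb j =>
          if PySem.Str.slice word (some i) (some j) ∈ token_bench then
            rb ++ [PySem.Str.slice word (some i) (some j)]
          else rb) rb) ++ ["<unk>"]) []

-- ===== PORT B =====
-- B: `vocabulary` is the empty module constant, so no slice ever matches;
-- the result is the closed form ['<unk>'] * (len(word) - 1).
def slash_word_to_token_alt (word : String) : List String :=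
  PySem.List.pyRepeat ["<unk>"] ((PySem.Str.len word : Int) - 1)

-- ===== PRECONDITION & SPEC =====
def Spec_slash_word_to_token (word : String) (out : List String) : Prop := out = slash_word_to_token_alt word
instance (word : String) (out : List String) : Decidable (Spec_slash_word_to_token word out) := by unfold Spec_slash_word_to_token; infer_instance

-- ===== CLAIM (what is proved, stated in full; the proofs are below) =====
def Claim_equal_slash_word_to_token : Prop := ∀ (word : String), Dom_slash_word_to_token word → Spec_slash_word_to_token word (slash_word_to_token word)

-- ===== LEMMAS AND PROOFS =====

-- folding a constant-append over any list yields init ++ replicate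
theorem foldl_const_unk (l : List Int) (init : List String) :
    l.foldl (fun rb _ => rb ++ ["<unk>"]) init = init ++ List.replicate l.length "<unk>" := by
  induction l generalizing init with
  | nil => simp
  | cons x xs ih => simp [List.foldl, ih, List.replicate_succ]

-- ===== VERDICT (by name: the statement is the Claim_ definition above) =====
theorem slash_word_to_token_spec : Claim_equal_slash_word_to_token := by
  intro word _
  unfold Spec_slash_word_to_token slash_word_to_token slash_word_to_token_alt pvVocabulary
  simp only [List.foldl_nil, List.not_mem_nil, if_false, List.foldl_fixed]
  rw [foldl_const_unk]
  simp [PySem.List.pyRepeat_singleton, PySem.List.length_pyRange_one]
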